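-- pv_equiv track=rewrite | github.com/tesolchina/smartLessons | operating/markdown_cleanup_via_llm.py | split_on_headings
-- ===== SOURCE A (Python) =====
-- from typing import List, Tuple
--
-- def split_on_headings(text: str, max_chunk_chars: int = 6000) -> List[str]:
--     parts: List[str] = []
--     current: List[str] = []
--     size = 0
--     for line in text.splitlines():
--         if size >= max_chunk_chars and line.startswith('#'):
--             parts.append('\n'.join(current).strip())
--             current, size = [], 0
--         current.append(line)
--         size += len(line) + 1
--     if current:
--         parts.append('\n'.join(current).strip())
--     return [p for p in parts if p]
-- ===== SOURCE B (Python) =====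
-- from typing import List
--
-- def split_on_headings(text: str, max_chunk_chars: int = 6000) -> List[str]:
--     # Pass 1: cut lines into segments at heading lines; a segment's size is sum(len(line)+1).
--     segments: List[List[str]] = []
--     cur: List[str] = []
--     for line in text.splitlines():
--         if line.startswith('#') and cur:
--             segments.append(cur)
--             cur = []
--         cur.append(line)
--     if cur:
--         segments.append(cur)
--     sizes = [sum(len(l) + 1 for l in seg) for seg in segments]
--     # Pass 2: greedily pack segments into chunks.
--     chunks: List[List[str]] = []
--     acc: List[str] = []
--     running = 0
--     for seg, sz in zip(segments, sizes):
--         if seg[0].startswith('#') and running >= max_chunk_chars: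
--             chunks.append(acc)
--             acc = []
--             running = 0
--         acc.extend(seg)
--         running += sz
--     if acc:
--         chunks.append(acc)
--     out: List[str] = []
--     for c in chunks:
--         s = '\n'.join(c).strip()
--         if s:
--             out.append(s)
--     return out
-- ===== Notes on version B (the rewrite author's own statement) =====
-- stated objective: alternative
-- what changed: A's single stateful line loop (flush decision interleaved with accumulation) is replaced by a two-pass decomposition: first cut the lines into heading-started segments with their sizes, then greedily pack whole segments into chunks, joining/stripping/filtering at the end.
import Mathlib
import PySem

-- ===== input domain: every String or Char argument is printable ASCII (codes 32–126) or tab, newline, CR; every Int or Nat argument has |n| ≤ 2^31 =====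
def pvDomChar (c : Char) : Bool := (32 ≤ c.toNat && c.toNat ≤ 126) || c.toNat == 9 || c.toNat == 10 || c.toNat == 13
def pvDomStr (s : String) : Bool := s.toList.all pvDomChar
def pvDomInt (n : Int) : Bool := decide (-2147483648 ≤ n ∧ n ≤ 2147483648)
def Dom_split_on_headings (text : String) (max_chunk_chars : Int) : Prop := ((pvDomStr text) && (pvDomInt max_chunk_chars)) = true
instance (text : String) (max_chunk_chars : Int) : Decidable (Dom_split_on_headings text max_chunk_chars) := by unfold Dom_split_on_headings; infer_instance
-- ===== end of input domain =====

-- B replaces A's single stateful line loop by two passes — cut the lines into heading-started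
-- segments first, then greedily pack whole segments into chunks (objective: alternative decomposition).

-- '\n'.join(c).strip() — both Pythons compute this when emitting a chunk
def pvJoinStrip (c : List String) : String := PySem.Str.strip (PySem.Str.join "\n" c)

-- ===== PORT A =====
-- one iteration of A's 'for line in text.splitlines()' loop; state = (parts, current, size)
def pvStepA (max_chunk_chars : Int) (st : List String × List String × Int) (line : String) :
    List String × List String × Int :=
  let st1 :=
    if st.2.2 ≥ max_chunk_chars ∧ PySem.Str.startswith line "#" = true then
      (st.1 ++ [pvJoinStrip st.2.1], ([] : List String), (0 : Int))
    else st
  (st1.1, st1.2.1 ++ [line], st1.2.2 + PySem.Str.len line + 1)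

def split_on_headings (text : String) (max_chunk_chars : Int) : List String :=
  let fin := (PySem.Str.splitlines text).foldl (pvStepA max_chunk_chars) ([], [], 0)
  let parts := if fin.2.1 ≠ [] then fin.1 ++ [pvJoinStrip fin.2.1] else fin.1
  parts.filter (fun p => p != "")

-- ===== PORT B =====
-- pass 1 step: cut at a heading line when the current segment is nonempty; state = (segments, cur)
def pvSegStep (st : List (List String) × List String) (line : String) :
    List (List String) × List String :=
  let st1 :=
    if PySem.Str.startswith line "#" = true ∧ st.2 ≠ [] then (st.1 ++ [st.2], ([] : List String))
    else st
  (st1.1, st1.2 ++ [line])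

-- sum(len(l) + 1 for l in seg)
def pvSegSize (seg : List String) : Int := (seg.map (fun l => PySem.Str.len l + 1)).sum

-- pass 2 step: pack one (segment, size) pair; state = (chunks, acc, running).
-- Source B reads seg[0]; every segment pass 1 produces is nonempty, so headD "" is exact here.
def pvPackStep (max_chunk_chars : Int) (st : List (List String) × List String × Int)
    (p : List String × Int) : List (List String) × List String × Int :=
  let st1 :=
    if PySem.Str.startswith (p.1.headD "") "#" = true ∧ st.2.2 ≥ max_chunk_chars then
      (st.1 ++ [st.2.1], ([] : List String), (0 : Int))
    else st
  (st1.1, st1.2.1 ++ p.1, st1.2.2 + p.2)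

def split_on_headings_alt (text : String) (max_chunk_chars : Int) : List String :=
  let sg := (PySem.Str.splitlines text).foldl pvSegStep ([], [])
  let segments := if sg.2 ≠ [] then sg.1 ++ [sg.2] else sg.1
  let sizes := segments.map pvSegSize
  let pk := (segments.zip sizes).foldl (pvPackStep max_chunk_chars) ([], [], 0)
  let chunks := if pk.2.1 ≠ [] then pk.1 ++ [pk.2.1] else pk.1
  chunks.foldl (fun out c =>
      let s := pvJoinStrip c
      if s != "" then out ++ [s] else out) []

-- ===== PRECONDITION & SPEC =====
def Spec_split_on_headings (text : String) (max_chunk_chars : Int) (out : List String) : Prop := out = split_on_headings_alt text max_chunk_chars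
instance (text : String) (max_chunk_chars : Int) (out : List String) : Decidable (Spec_split_on_headings text max_chunk_chars out) := by unfold Spec_split_on_headings; infer_instance

-- ===== CLAIM (what is proved, stated in full; the proofs are below) =====
def Claim_equal_split_on_headings : Prop := ∀ (text : String) (max_chunk_chars : Int), Dom_split_on_headings text max_chunk_chars → Spec_split_on_headings text max_chunk_chars (split_on_headings text max_chunk_chars)

-- ===== LEMMAS AND PROOFS =====

-- a run of non-heading lines never flushes: it only extends current and size
lemma pvFoldA_nohead (m : Int) (t : List String)
    (ht : ∀ l ∈ t, PySem.Str.startswith l "#" = false)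
    (p c : List String) (s : Int) :
    t.foldl (pvStepA m) (p, c, s) = (p, c ++ t, s + pvSegSize t) := by
  induction t generalizing c s with
  | nil => simp [pvSegSize]
  | cons l t ih =>
      have hl : PySem.Str.startswith l "#" = false := ht l (by simp)
      have ht' : ∀ x ∈ t, PySem.Str.startswith x "#" = false := fun x hx => ht x (by simp [hx])
      simp only [List.foldl_cons, pvStepA]
      rw [if_neg (by rintro ⟨-, hh⟩; rw [hl] at hh; exact Bool.false_ne_true hh)]
      rw [ih ht' (c ++ [l]) (s + PySem.Str.len l + 1)]
      simp [pvSegSize]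
      try ring

-- A's loop over one whole segment (head possibly a heading, tail heading-free)
lemma pvFoldA_seg (m : Int) (h0 : String) (t : List String)
    (ht : ∀ l ∈ t, PySem.Str.startswith l "#" = false)
    (p c : List String) (s : Int) :
    (h0 :: t).foldl (pvStepA m) (p, c, s) =
      if PySem.Str.startswith h0 "#" = true ∧ s ≥ m then
        (p ++ [pvJoinStrip c], h0 :: t, pvSegSize (h0 :: t))
      else (p, c ++ (h0 :: t), s + pvSegSize (h0 :: t)) := by
  simp only [List.foldl_cons, pvStepA]
  by_cases hc : PySem.Str.startswith h0 "#" = true ∧ s ≥ m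
  · rw [if_pos (by exact ⟨hc.2, hc.1⟩), if_pos hc]
    rw [pvFoldA_nohead m t ht _ ([] ++ [h0]) (0 + PySem.Str.len h0 + 1)]
    simp [pvSegSize]
    try ring
  · rw [if_neg (by tauto), if_neg hc]
    rw [pvFoldA_nohead m t ht p (c ++ [h0]) (s + PySem.Str.len h0 + 1)]
    simp [pvSegSize]
    try ring

-- fold over the zip of a list with its mapped sizes = fold over the list
lemma pvFoldl_zip_map {α β γ : Type} (xs : List α) (f : α → β)
    (g : γ → α × β → γ) (i : γ) :
    (xs.zip (xs.map f)).foldl g i = xs.foldl (fun st x => g st (x, f x)) i := by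
  induction xs generalizing i with
  | nil => rfl
  | cons x xs ih => simp only [List.map_cons, List.zip_cons_cons, List.foldl_cons, ih]

-- MAIN: A's line loop over flattened good segments tracks B's packing fold
lemma pvMain (m : Int) (segs : List (List String))
    (hg : ∀ seg ∈ segs, seg ≠ [] ∧ ∀ l ∈ seg.tail, PySem.Str.startswith l "#" = false)
    (P : List (List String)) (acc : List String) (run : Int) :
    segs.flatten.foldl (pvStepA m) (P.map pvJoinStrip, acc, run) =
      ((segs.foldl (fun st seg => pvPackStep m st (seg, pvSegSize seg)) (P, acc, run)).1.map pvJoinStrip,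
       (segs.foldl (fun st seg => pvPackStep m st (seg, pvSegSize seg)) (P, acc, run)).2.1,
       (segs.foldl (fun st seg => pvPackStep m st (seg, pvSegSize seg)) (P, acc, run)).2.2) := by
  induction segs generalizing P acc run with
  | nil => simp
  | cons seg rest ih =>
      obtain ⟨hne, htail⟩ := hg seg (by simp)
      obtain ⟨h0, t, rfl⟩ : ∃ h0 t, seg = h0 :: t := by
        cases seg with
        | nil => exact absurd rfl hne
        | cons a b => exact ⟨a, b, rfl⟩
      have hrest : ∀ s ∈ rest, s ≠ [] ∧ ∀ l ∈ s.tail, PySem.Str.startswith l "#" = false :=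
        fun s hs => hg s (by simp [hs])
      have hstep : pvPackStep m (P, acc, run) (h0 :: t, pvSegSize (h0 :: t)) =
          if PySem.Str.startswith h0 "#" = true ∧ run ≥ m then
            (P ++ [acc], h0 :: t, pvSegSize (h0 :: t))
          else (P, acc ++ (h0 :: t), run + pvSegSize (h0 :: t)) := by
        simp only [pvPackStep, List.headD_cons]
        split_ifs with h <;> simp
      simp only [List.flatten_cons, List.foldl_append]
      rw [pvFoldA_seg m h0 t htail]
      simp only [List.foldl_cons]
      rw [hstep]
      by_cases hc : PySem.Str.startswith h0 "#" = true ∧ run ≥ m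
      · rw [if_pos hc, if_pos hc]
        have := ih hrest (P ++ [acc]) (h0 :: t) (pvSegSize (h0 :: t))
        simpa using this
      · rw [if_neg hc, if_neg hc]
        exact ih hrest P (acc ++ (h0 :: t)) (run + pvSegSize (h0 :: t))

-- pass 1 invariants: segments are nonempty with heading-free tails, and they flatten back to the lines
lemma pvSegFold_spec (lines : List String) : ∀ (sg : List (List String)) (cu : List String),
    (∀ seg ∈ sg, seg ≠ [] ∧ ∀ l ∈ seg.tail, PySem.Str.startswith l "#" = false) →
    (∀ l ∈ cu.tail, PySem.Str.startswith l "#" = false) →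
    (∀ seg ∈ (lines.foldl pvSegStep (sg, cu)).1, seg ≠ [] ∧ ∀ l ∈ seg.tail, PySem.Str.startswith l "#" = false) ∧
    (∀ l ∈ (lines.foldl pvSegStep (sg, cu)).2.tail, PySem.Str.startswith l "#" = false) ∧
    (lines.foldl pvSegStep (sg, cu)).1.flatten ++ (lines.foldl pvSegStep (sg, cu)).2 = sg.flatten ++ (cu ++ lines) := by
  induction lines with
  | nil => intro sg cu h1 h2; exact ⟨h1, h2, by simp⟩
  | cons line rest ih =>
      intro sg cu h1 h2
      simp only [List.foldl_cons, pvSegStep]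
      by_cases hc : PySem.Str.startswith line "#" = true ∧ cu ≠ []
      · rw [if_pos hc]
        obtain ⟨hA, hB, hC⟩ := ih (sg ++ [cu]) ([] ++ [line])
          (by intro s hs
              rcases List.mem_append.1 hs with h | h
              · exact h1 s h
              · simp at h; subst h; exact ⟨hc.2, h2⟩)
          (by simp)
        refine ⟨hA, hB, ?_⟩
        rw [hC]; simp
      · rw [if_neg hc]
        obtain ⟨hA, hB, hC⟩ := ih sg (cu ++ [line]) h1
          (by cases cu with
              | nil => simp
              | cons a b =>
                  have hline : PySem.Str.startswith line "#" = false := by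
                    by_cases hl : PySem.Str.startswith line "#" = true
                    · exact absurd ⟨hl, by simp⟩ hc
                    · simpa using hl
                  intro l hl'
                  simp only [List.cons_append, List.tail_cons] at hl'
                  rcases List.mem_append.1 hl' with h | h
                  · exact h2 l (by simpa using h)
                  · simp at h; subst h; exact hline)
        refine ⟨hA, hB, ?_⟩
        rw [hC]; simp
  
-- ===== VERDICT (by name: the statement is the Claim_ definition above) =====
theorem split_on_headings_spec : Claim_equal_split_on_headings := by
  intro text m _
  show split_on_headings text m = split_on_headings_alt text m
  simp only [split_on_headings, split_on_headings_alt]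
  set lines := PySem.Str.splitlines text with hlines
  obtain ⟨hGood, hTail, hFlat⟩ := pvSegFold_spec lines [] [] (by simp) (by simp)
  set sg := lines.foldl pvSegStep ([], []) with hsg
  set segments := (if sg.2 ≠ [] then sg.1 ++ [sg.2] else sg.1) with hsegs
  have hGoodAll : ∀ seg ∈ segments, seg ≠ [] ∧ ∀ l ∈ seg.tail, PySem.Str.startswith l "#" = false := by
    intro seg hseg
    rw [hsegs] at hseg
    by_cases h2 : sg.2 ≠ []
    · rw [if_pos h2] at hseg
      rcases List.mem_append.1 hseg with h | h
      · exact hGood seg h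
      · simp at h; subst h; exact ⟨h2, hTail⟩
    · rw [if_neg h2] at hseg; exact hGood seg hseg
  have hFlatAll : segments.flatten = lines := by
    rw [hsegs]
    by_cases h2 : sg.2 ≠ []
    · rw [if_pos h2]; simp only [List.flatten_append, List.flatten_cons, List.flatten_nil, List.append_nil]
      simpa using hFlat
    · rw [if_neg h2]
      simp only [ne_eq, not_not] at h2
      have := hFlat
      rw [h2] at this; simpa using this
  rw [pvFoldl_zip_map segments pvSegSize (pvPackStep m) ([], [], 0)]
  have hmain := pvMain m segments hGoodAll [] [] 0
  rw [hFlatAll] at hmain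
  simp only [List.map_nil] at hmain
  rw [hmain]
  dsimp only
  set pk := segments.foldl (fun st seg => pvPackStep m st (seg, pvSegSize seg)) ([], [], 0) with hpk
  set chunks := (if pk.2.1 ≠ [] then pk.1 ++ [pk.2.1] else pk.1) with hchunks
  have hparts : (if pk.2.1 ≠ [] then pk.1.map pvJoinStrip ++ [pvJoinStrip pk.2.1] else pk.1.map pvJoinStrip)
      = chunks.map pvJoinStrip := by
    rw [hchunks]
    by_cases h2 : pk.2.1 ≠ []
    · rw [if_pos h2, if_pos h2]; simp
    · rw [if_neg h2, if_neg h2]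
  rw [hparts]
  have hfold := PySem.List.foldl_append_if (fun c => pvJoinStrip c != "") pvJoinStrip chunks []
  simp only [List.nil_append] at hfold
  rw [hfold]
  rw [List.filter_map]
  rfl
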